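-- pv_equiv track=rewrite | github.com/Rajasekhar1131997/TIP102_Sessions | Week2Session1_SPSV1.py | max_audience_performances
-- ===== SOURCE A (Python) =====
-- def max_audience_performances(audiences):
--     if not audiences:
--         return 0
--     M = max(audiences)
--     total = 0
--     for size in audiences:
--         if size == M:
--             total += size
--     return total
-- ===== SOURCE B (Python) =====
-- def max_audience_performances(audiences):
--     if not audiences:
--         return 0
--     best = audiences[0]
--     total = audiences[0]
--     for size in audiences[1:]:
--         if size > best:
--             best = size
--             total = size
--         elif size == best:
--             total += size
--     return total
-- ===== Notes on version B (the rewrite author's own statement) =====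
-- stated objective: alternative
-- what changed: Replaces A's two passes (max() scan then a summing loop) by one fused pass maintaining the running maximum and a conditionally-reset accumulator.
import Mathlib
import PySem

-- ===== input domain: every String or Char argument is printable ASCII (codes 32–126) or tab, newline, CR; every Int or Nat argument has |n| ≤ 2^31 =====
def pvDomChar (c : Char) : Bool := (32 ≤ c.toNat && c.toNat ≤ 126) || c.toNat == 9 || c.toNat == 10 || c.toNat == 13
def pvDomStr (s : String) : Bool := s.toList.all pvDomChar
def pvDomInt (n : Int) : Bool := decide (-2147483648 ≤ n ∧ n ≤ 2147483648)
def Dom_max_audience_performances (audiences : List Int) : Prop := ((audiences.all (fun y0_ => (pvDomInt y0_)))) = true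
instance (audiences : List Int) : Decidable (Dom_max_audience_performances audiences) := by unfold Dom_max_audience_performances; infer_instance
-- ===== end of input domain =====

-- B fuses A's two passes (max() scan, then a summing loop) into one pass with a
-- running maximum and a conditionally-reset accumulator; same O(n) cost.

-- ===== PORT A =====
def max_audience_performances (audiences : List Int) : Int :=
  if audiences = [] then 0
  else
    match PySem.List.max? audiences (fun y => y) with
    | none => 0
    | some M => audiences.foldl (fun total size => if size = M then total + size else total) 0

-- ===== PORT B =====
def max_audience_performances_alt (audiences : List Int) : Int :=
  match audiences with
  | [] => 0
  | x :: rest =>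
    (rest.foldl (fun (st : Int × Int) size =>
        if size > st.1 then (size, size)
        else if size = st.1 then (st.1, st.2 + size)
        else st) (x, x)).2

-- ===== PRECONDITION & SPEC =====
def Spec_max_audience_performances (audiences : List Int) (out : Int) : Prop := out = max_audience_performances_alt audiences
instance (audiences : List Int) (out : Int) : Decidable (Spec_max_audience_performances audiences out) := by unfold Spec_max_audience_performances; infer_instance

-- ===== CLAIM (what is proved, stated in full; the proofs are below) =====
def Claim_equal_max_audience_performances : Prop := ∀ (audiences : List Int), Dom_max_audience_performances audiences → Spec_max_audience_performances audiences (max_audience_performances audiences)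

-- ===== LEMMAS AND PROOFS =====

/-- A's summing loop (proof abbreviation). -/
def selSum (M : Int) (l : List Int) : Int :=
  l.foldl (fun total size => if size = M then total + size else total) 0

theorem sum_loop_acc (M : Int) (l : List Int) (a : Int) :
    l.foldl (fun total size => if size = M then total + size else total) a
      = a + selSum M l := by
  induction l generalizing a with
  | nil => simp [selSum]
  | cons s l ih =>
    simp only [selSum, List.foldl_cons] at *
    by_cases h : s = M
    · rw [if_pos h, if_pos h, ih (a + s), ih (0 + s)]; ring
    · rw [if_neg h, if_neg h, ih a, ih 0]

theorem selSum_cons (M s : Int) (l : List Int) :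
    selSum M (s :: l) = (if s = M then s else 0) + selSum M l := by
  simp only [selSum, List.foldl_cons]
  rw [sum_loop_acc]
  split_ifs <;> simp [selSum]

/-- Invariant of B's fused loop: first component is the running max, second the
    selective sum, the seed surviving iff it stays maximal. -/
theorem fused_loop_inv (l : List Int) (b t : Int) :
    l.foldl (fun (st : Int × Int) size =>
        if size > st.1 then (size, size)
        else if size = st.1 then (st.1, st.2 + size)
        else st) (b, t)
      = (l.foldl max b,
         (if l.foldl max b = b then t else 0) + selSum (l.foldl max b) l) := by
  induction l generalizing b t with
  | nil => simp [selSum]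
  | cons s l ih =>
    simp only [List.foldl_cons]
    rcases lt_trichotomy b s with h | h | h
    · rw [if_pos h, ih s s]
      simp only [max_eq_right (le_of_lt h)]
      have hms : s ≤ l.foldl max s := (PySem.List.le_foldl_max l s).1
      have hne : l.foldl max s ≠ b := by omega
      rw [if_neg hne, selSum_cons]
      simp only [Prod.mk.injEq]
      refine ⟨trivial, ?_⟩
      by_cases he : l.foldl max s = s
      · rw [if_pos he, if_pos he.symm]; ring
      · rw [if_neg he, if_neg (fun hh => he hh.symm)]; ring
    · subst h
      rw [if_neg (lt_irrefl b), if_pos rfl, ih b (t + b)]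
      simp only [max_self, Prod.mk.injEq]
      refine ⟨trivial, ?_⟩
      rw [selSum_cons]
      by_cases he : l.foldl max b = b
      · rw [if_pos he, if_pos he, if_pos he.symm]; ring
      · rw [if_neg he, if_neg he, if_neg (fun hh => he hh.symm)]; ring
    · rw [if_neg (not_lt_of_gt h), if_neg (ne_of_lt h), ih b t]
      simp only [max_eq_left (le_of_lt h), Prod.mk.injEq]
      refine ⟨trivial, ?_⟩
      rw [selSum_cons]
      have hmb : b ≤ l.foldl max b := (PySem.List.le_foldl_max l b).1
      have hsne : s ≠ l.foldl max b := by omega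
      rw [if_neg hsne]; ring

-- ===== VERDICT (by name: the statement is the Claim_ definition above) =====
theorem max_audience_performances_spec : Claim_equal_max_audience_performances := by
  intro audiences _
  unfold Spec_max_audience_performances
  cases audiences with
  | nil => rfl
  | cons x rest =>
    simp only [max_audience_performances, max_audience_performances_alt,
      PySem.List.max?_id_cons, reduceCtorEq, if_false]
    rw [fused_loop_inv rest x x]
    have hA : List.foldl
        (fun total size => if size = rest.foldl max x then total + size else total) 0 (x :: rest)
        = selSum (rest.foldl max x) (x :: rest) := rfl
    rw [hA, selSum_cons]
    have hmx : x ≤ rest.foldl max x := (PySem.List.le_foldl_max rest x).1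
    by_cases he : rest.foldl max x = x
    · simp [he]
    · rw [if_neg he, if_neg (fun hh => he hh.symm)]
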